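-- pv_equiv track=rewrite | github.com/catanadj/taskwarrior-nautical | nautical_core/__init__.py | _bd_shift_from_term
-- ===== SOURCE A (Python) =====
-- def _bd_shift_from_term(term) -> str | None:
--     """Return 'pbd' (previous) or 'nbd' (next) if any atom has that modifier."""
--     saw_p = False
--     saw_n = False
--     for a in term:
--         mods = a.get("mods") or {}
--         if mods.get("pbd"):
--             saw_p = True
--         if mods.get("nbd"):
--             saw_n = True
--     # If both appear, prefer explicit 'previous' (deterministic; you can swap if you prefer)
--     if saw_p and not saw_n:
--         return "pbd"
--     if saw_n and not saw_p:
--         return "nbd"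
--     if saw_p and saw_n:
--         return "pbd"
--     return None
-- ===== SOURCE B (Python) =====
-- def _bd_shift_from_term(term) -> str | None:
--     """Return 'pbd' (previous) or 'nbd' (next) if any atom has that modifier."""
--     atoms = list(term)
--     if any((a.get("mods") or {}).get("pbd") for a in atoms):
--         return "pbd"
--     if any((a.get("mods") or {}).get("nbd") for a in atoms):
--         return "nbd"
--     return None
-- ===== Notes on version B (the rewrite author's own statement) =====
-- stated objective: idiomatic
-- what changed: Replaces the single flag-accumulating loop plus a four-way branch chain with two independent short-circuiting any() membership scans, pbd first since pbd always wins.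
import Mathlib
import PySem

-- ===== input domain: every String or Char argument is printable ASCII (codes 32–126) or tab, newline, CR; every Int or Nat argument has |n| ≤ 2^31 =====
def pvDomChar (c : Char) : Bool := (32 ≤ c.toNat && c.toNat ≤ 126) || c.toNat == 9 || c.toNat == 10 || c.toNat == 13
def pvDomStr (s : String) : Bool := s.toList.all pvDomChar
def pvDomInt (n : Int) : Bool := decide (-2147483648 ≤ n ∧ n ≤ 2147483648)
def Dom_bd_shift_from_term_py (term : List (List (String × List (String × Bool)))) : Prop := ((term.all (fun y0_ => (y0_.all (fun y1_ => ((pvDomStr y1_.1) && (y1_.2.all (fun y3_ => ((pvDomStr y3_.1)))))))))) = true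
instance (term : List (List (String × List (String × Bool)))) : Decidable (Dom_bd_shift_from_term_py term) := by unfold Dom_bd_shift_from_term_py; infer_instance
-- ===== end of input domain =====

-- B replaces A's flag-accumulating loop + four-way branch chain with two independent
-- short-circuiting any() scans (pbd first, since pbd always wins); idiomatic, same cost.


-- ===== PORT A =====
-- `mods = a.get("mods") or {}` — get? none or an empty dict both collapse to the empty dict
def pvModFlagA (a : List (String × List (String × Bool))) (k : String) : Bool :=
  let mods := ((PySem.Dict.mk a).get? "mods").getD []
  ((PySem.Dict.mk mods).get? k).getD false

def bd_shift_from_term_py (term : List (List (String × List (String × Bool)))) : Option String :=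
  let st := term.foldl (fun (st : Bool × Bool) a =>
    let sp := if pvModFlagA a "pbd" then true else st.1
    let sn := if pvModFlagA a "nbd" then true else st.2
    (sp, sn)) (false, false)
  if st.1 && !st.2 then some "pbd"
  else if st.2 && !st.1 then some "nbd"
  else if st.1 && st.2 then some "pbd"
  else none

-- ===== PORT B =====
def pvModFlagB (a : List (String × List (String × Bool))) (k : String) : Bool :=
  ((PySem.Dict.mk (((PySem.Dict.mk a).get? "mods").getD [])).get? k).getD false

def bd_shift_from_term_py_alt (term : List (List (String × List (String × Bool)))) : Option String :=
  if term.any (fun a => pvModFlagB a "pbd") then some "pbd"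
  else if term.any (fun a => pvModFlagB a "nbd") then some "nbd"
  else none

-- ===== PRECONDITION & SPEC =====
def Spec_bd_shift_from_term_py (term : List (List (String × List (String × Bool)))) (out : Option String) : Prop := out = bd_shift_from_term_py_alt term
instance (term : List (List (String × List (String × Bool)))) (out : Option String) : Decidable (Spec_bd_shift_from_term_py term out) := by unfold Spec_bd_shift_from_term_py; infer_instance

-- ===== CLAIM (what is proved, stated in full; the proofs are below) =====
def Claim_equal_bd_shift_from_term_py : Prop := ∀ (term : List (List (String × List (String × Bool)))), Dom_bd_shift_from_term_py term → Spec_bd_shift_from_term_py term (bd_shift_from_term_py term)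

-- ===== LEMMAS AND PROOFS =====

-- A's loop computes exactly "initial flags OR-ed with a membership scan for each modifier"
theorem pv_foldl_flags (term : List (List (String × List (String × Bool)))) (sp sn : Bool) :
    term.foldl (fun (st : Bool × Bool) a =>
      let sp := if pvModFlagA a "pbd" then true else st.1
      let sn := if pvModFlagA a "nbd" then true else st.2
      (sp, sn)) (sp, sn)
    = (sp || term.any (fun a => pvModFlagA a "pbd"),
       sn || term.any (fun a => pvModFlagA a "nbd")) := by
  induction term generalizing sp sn with
  | nil => simp
  | cons a t ih =>
      simp only [List.foldl_cons, List.any_cons, ih]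
      cases h1 : pvModFlagA a "pbd" <;> cases h2 : pvModFlagA a "nbd" <;> simp

theorem pv_flag_eq (a : List (String × List (String × Bool))) (k : String) :
    pvModFlagA a k = pvModFlagB a k := rfl

-- ===== VERDICT (by name: the statement is the Claim_ definition above) =====
theorem bd_shift_from_term_py_spec : Claim_equal_bd_shift_from_term_py := by
  intro term _
  unfold Spec_bd_shift_from_term_py bd_shift_from_term_py bd_shift_from_term_py_alt
  rw [pv_foldl_flags]
  simp only [pv_flag_eq, Bool.false_or]
  cases hp : term.any (fun a => pvModFlagB a "pbd") <;>
    cases hn : term.any (fun a => pvModFlagB a "nbd") <;> simp
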